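-- pv_equiv track=rewrite | github.com/laurago894/HwAwareProb | functions/inference_fcns.py | extract_operation_numbers
-- ===== SOURCE A (Python) =====
-- def extract_operation_numbers(content):
--     # spaces = indices(content, lambda x: x.isspace())
--     spaces=[ii for ii,con in enumerate(content) if con.isspace()]
--     ex_op=[]
--     if content[0] == 'A':
--         for sp in range(len(spaces) - 1):
--             if sp == len(spaces) - 2:
--                 ex_op.append(content[spaces[sp + 1] + 1:])
--             else:
--                 ex_op.append(content[spaces[sp + 1] + 1:spaces[sp + 2]])
--     else:
--         for sp in range(len(spaces) - 2):
--             if sp == len(spaces) - 3: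
--                 ex_op.append(content[spaces[sp + 2] + 1:])
--             else:
--                 ex_op.append(content[spaces[sp + 2] + 1:spaces[sp + 3]])
--     return ex_op,spaces
-- ===== SOURCE B (Python) =====
-- def extract_operation_numbers(content):
--     # One forward character scan: collect whitespace indices and build the
--     # segments between them incrementally (no index slicing at all).
--     spaces = []
--     segs = []
--     buf = []
--     for i, ch in enumerate(content):
--         if ch.isspace():
--             spaces.append(i)
--             segs.append(''.join(buf))
--             buf = []
--         else:
--             buf.append(ch)
--     segs.append(''.join(buf))
--     drop = 2 if content[0] == 'A' else 3
--     return segs[drop:], spaces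
-- ===== Notes on version B (the rewrite author's own statement) =====
-- stated objective: alternative
-- what changed: Replaces A's index-then-slice strategy (collect whitespace indices, then re-slice the string by pairs of stored indices with a last-element branch) by a single forward character scan that builds the whitespace-index list and the segments between whitespace incrementally in one pass, never slicing, then drops the first 2 or 3 segments.
import Mathlib
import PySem

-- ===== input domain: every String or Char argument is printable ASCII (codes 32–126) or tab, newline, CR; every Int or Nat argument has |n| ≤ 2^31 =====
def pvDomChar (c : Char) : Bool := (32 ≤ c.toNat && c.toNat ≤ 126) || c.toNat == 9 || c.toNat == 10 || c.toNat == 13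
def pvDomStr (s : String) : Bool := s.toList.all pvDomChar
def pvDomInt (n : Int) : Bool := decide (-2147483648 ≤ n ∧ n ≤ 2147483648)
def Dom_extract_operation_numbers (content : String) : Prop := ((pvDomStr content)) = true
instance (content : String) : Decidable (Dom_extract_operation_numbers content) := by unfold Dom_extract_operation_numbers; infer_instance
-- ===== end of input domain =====

-- B replaces A's index-then-slice strategy by one forward character scan that builds the
-- whitespace indices and the segments between them incrementally (no slicing); alternative algorithm.

-- ===== PORT A =====
-- spaces = [ii for ii,con in enumerate(content) if con.isspace()]
def pvSpaces (content : String) : List Int :=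
  ((PySem.List.enumerate content.toList 0).filter (fun p => PySem.Chars.isspace p.2)).map (·.1)

-- literal port of A; spaces[i] is read with pyGetD (every access A makes is in range, so exact);
-- content[0] == 'A' is pyGet? content 0 = some 'A' (the none case is excluded by Pre_)
def extract_operation_numbers (content : String) : List String × List Int :=
  let spaces := pvSpaces content
  let n : Int := spaces.length
  let exOp : List String :=
    if PySem.Str.pyGet? content 0 = some 'A' then
      (PySem.List.pyRange 0 (n - 1) 1).foldl (fun acc sp =>
        if sp = n - 2 then
          acc ++ [PySem.Str.slice content (some (PySem.List.pyGetD spaces (sp + 1) 0 + 1)) none]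
        else
          acc ++ [PySem.Str.slice content (some (PySem.List.pyGetD spaces (sp + 1) 0 + 1))
                    (some (PySem.List.pyGetD spaces (sp + 2) 0))]) []
    else
      (PySem.List.pyRange 0 (n - 2) 1).foldl (fun acc sp =>
        if sp = n - 3 then
          acc ++ [PySem.Str.slice content (some (PySem.List.pyGetD spaces (sp + 2) 0 + 1)) none]
        else
          acc ++ [PySem.Str.slice content (some (PySem.List.pyGetD spaces (sp + 2) 0 + 1))
                    (some (PySem.List.pyGetD spaces (sp + 3) 0))]) []
  (exOp, spaces)

-- ===== PORT B =====
-- the loop body of Source B: state is (spaces, segs, buf)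
def pvStep (st : List Int × List String × List Char) (p : Int × Char) :
    List Int × List String × List Char :=
  if PySem.Chars.isspace p.2 then (st.1 ++ [p.1], st.2.1 ++ [String.ofList st.2.2], [])
  else (st.1, st.2.1, st.2.2 ++ [p.2])

-- literal port of Source B: one forward scan over enumerate(content), then drop the first 2/3 segments
def extract_operation_numbers_alt (content : String) : List String × List Int :=
  let r := (PySem.List.enumerate content.toList 0).foldl pvStep ([], [], [])
  let segs := r.2.1 ++ [String.ofList r.2.2]
  let drop : Int := if PySem.Str.pyGet? content 0 = some 'A' then 2 else 3
  (PySem.List.slice segs (some drop) none, r.1)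

-- ===== PRECONDITION & SPEC =====
-- Pre_ excludes only the empty string, on which A (content[0]) raises IndexError.
def Pre_extract_operation_numbers (content : String) : Prop := content ≠ ""
instance (content : String) : Decidable (Pre_extract_operation_numbers content) := by unfold Pre_extract_operation_numbers; infer_instance
def pvWitness_extract_operation_numbers : String := "A 1 22 3"
def Spec_extract_operation_numbers (content : String) (out : List String × List Int) : Prop := out = extract_operation_numbers_alt content
instance (content : String) (out : List String × List Int) : Decidable (Spec_extract_operation_numbers content out) := by unfold Spec_extract_operation_numbers; infer_instance

-- ===== CLAIM (what is proved, stated in full; the proofs are below) =====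
def Claim_equal_extract_operation_numbers : Prop := ∀ (content : String), Dom_extract_operation_numbers content → Pre_extract_operation_numbers content → Spec_extract_operation_numbers content (extract_operation_numbers content)

-- ===== LEMMAS AND PROOFS =====

def pvWsNat : List Char → List Nat
  | [] => []
  | c :: cs =>
      if PySem.Chars.isspace c then 0 :: (pvWsNat cs).map (· + 1)
      else (pvWsNat cs).map (· + 1)
def pvScan2 : List Char → List (List Char)
  | [] => [[]]
  | c :: cs =>
      if PySem.Chars.isspace c then [] :: pvScan2 cs
      else
        match pvScan2 cs with
        | [] => [[c]]
        | s :: ss => (c :: s) :: ss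
theorem pvScan2_ne_nil (cs : List Char) : pvScan2 cs ≠ [] := by
  induction cs with
  | nil => simp [pvScan2]
  | cons c cs ih =>
      unfold pvScan2
      by_cases hc : PySem.Chars.isspace c
      · simp [hc]
      · simp only [hc, Bool.false_eq_true, if_false]
        cases h : pvScan2 cs with
        | nil => simp
        | cons s ss => simp

theorem pvScan2_length (cs : List Char) :
    (pvScan2 cs).length = (pvWsNat cs).length + 1 := by
  induction cs with
  | nil => simp [pvScan2, pvWsNat]
  | cons c cs ih =>
      unfold pvScan2 pvWsNat
      by_cases hc : PySem.Chars.isspace c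
      · simp [hc, ih]
      · simp only [hc, Bool.false_eq_true, if_false]
        cases h : pvScan2 cs with
        | nil => exact absurd h (pvScan2_ne_nil cs)
        | cons s ss =>
            rw [h] at ih
            simp at ih ⊢
            omega

theorem pvGetDmap (l : List Nat) (j : Nat) (hj : j < l.length) :
    (l.map (· + 1)).getD j 0 = l.getD j 0 + 1 := by
  rw [List.getD_eq_getElem _ _ (by simpa), List.getD_eq_getElem _ _ hj, List.getElem_map]

theorem pvScan2_zero_last (cs : List Char) (h : pvWsNat cs = []) : pvScan2 cs = [cs] := by
  induction cs with
  | nil => simp [pvScan2]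
  | cons c cs ih =>
      unfold pvScan2
      unfold pvWsNat at h
      by_cases hc : PySem.Chars.isspace c
      · simp [hc] at h
      · simp only [hc, Bool.false_eq_true, if_false, List.map_eq_nil_iff] at h ⊢
        rw [ih h]

theorem pvScan2_zero_mid (cs : List Char) (h : 0 < (pvWsNat cs).length) :
    (pvScan2 cs)[0]? = some (cs.take ((pvWsNat cs).getD 0 0)) := by
  induction cs with
  | nil => simp [pvWsNat] at h
  | cons c cs ih =>
      unfold pvScan2 pvWsNat
      unfold pvWsNat at h
      by_cases hc : PySem.Chars.isspace c
      · simp [hc]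
      · simp only [hc, Bool.false_eq_true, if_false] at h ⊢
        simp only [List.length_map] at h
        cases hs : pvScan2 cs with
        | nil => exact absurd hs (pvScan2_ne_nil cs)
        | cons s ss =>
            have := ih h
            rw [hs] at this
            simp only [List.getElem?_cons_zero, Option.some.injEq] at this ⊢
            rw [pvGetDmap _ _ h]
            rw [List.take_succ_cons, this]

theorem pvScan2_mid (cs : List Char) (j : Nat) (hj : j + 1 < (pvWsNat cs).length) :
    (pvScan2 cs)[j + 1]? =
      some ((cs.take ((pvWsNat cs).getD (j + 1) 0)).drop ((pvWsNat cs).getD j 0 + 1)) := by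
  induction cs generalizing j with
  | nil => simp [pvWsNat] at hj
  | cons c cs ih =>
      unfold pvScan2 pvWsNat
      unfold pvWsNat at hj
      by_cases hc : PySem.Chars.isspace c
      · simp only [hc, if_pos, List.length_cons, List.length_map] at hj ⊢
        cases j with
        | zero =>
            have h0 := pvScan2_zero_mid cs (by omega)
            simp only [List.getElem?_cons_succ, List.getD_cons_succ, List.getD_cons_zero]
            rw [h0, pvGetDmap _ _ (by omega), List.take_succ_cons]
            simp
        | succ j' =>
            have ihj := ih j' (by omega)
            simp only [List.getElem?_cons_succ, List.getD_cons_succ]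
            rw [ihj, pvGetDmap _ _ (by omega), pvGetDmap _ _ (by omega), List.take_succ_cons]
            simp [List.drop_succ_cons]
      · simp only [hc, Bool.false_eq_true, if_false, List.length_map] at hj ⊢
        cases hs : pvScan2 cs with
        | nil => exact absurd hs (pvScan2_ne_nil cs)
        | cons s ss =>
            have ihj := ih j hj
            rw [hs] at ihj
            simp only [List.getElem?_cons_succ] at ihj ⊢
            rw [ihj, pvGetDmap _ _ (by omega), pvGetDmap _ _ (by omega), List.take_succ_cons]
            simp [List.drop_succ_cons]

theorem pvScan2_last (cs : List Char) (j : Nat) (hj : j + 1 = (pvWsNat cs).length) :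
    (pvScan2 cs)[j + 1]? = some (cs.drop ((pvWsNat cs).getD j 0 + 1)) := by
  induction cs generalizing j with
  | nil => simp [pvWsNat] at hj
  | cons c cs ih =>
      unfold pvScan2 pvWsNat
      unfold pvWsNat at hj
      by_cases hc : PySem.Chars.isspace c
      · simp only [hc, if_pos, List.length_cons, List.length_map] at hj ⊢
        cases j with
        | zero =>
            have h0 : pvWsNat cs = [] := List.eq_nil_of_length_eq_zero (by omega)
            rw [pvScan2_zero_last cs h0]
            simp
        | succ j' =>
            have ihj := ih j' (by omega)
            simp only [List.getElem?_cons_succ, List.getD_cons_succ]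
            rw [ihj, pvGetDmap _ _ (by omega)]
            simp [List.drop_succ_cons]
      · simp only [hc, Bool.false_eq_true, if_false, List.length_map] at hj ⊢
        cases hs : pvScan2 cs with
        | nil => exact absurd hs (pvScan2_ne_nil cs)
        | cons s ss =>
            have ihj := ih j hj
            rw [hs] at ihj
            simp only [List.getElem?_cons_succ] at ihj ⊢
            rw [ihj, pvGetDmap _ _ (by omega)]
            simp [List.drop_succ_cons]

def pvPrep (b : List Char) : List (List Char) → List (List Char)
  | [] => [b]
  | h :: t => (b ++ h) :: t

theorem pvFoldB (cs : List Char) (k : Int) (sp : List Int) (sg : List String) (buf : List Char) :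
    ((PySem.List.enumerate cs k).foldl pvStep (sp, sg, buf)).1
        = sp ++ (pvWsNat cs).map (fun i : Nat => (i : Int) + k)
    ∧ ((PySem.List.enumerate cs k).foldl pvStep (sp, sg, buf)).2.1
        ++ [String.ofList ((PySem.List.enumerate cs k).foldl pvStep (sp, sg, buf)).2.2]
        = sg ++ (pvPrep buf (pvScan2 cs)).map String.ofList := by
  induction cs generalizing k sp sg buf with
  | nil => simp [PySem.List.enumerate_nil, pvWsNat, pvScan2, pvPrep]
  | cons c cs ih =>
      rw [PySem.List.enumerate_cons]
      simp only [List.foldl_cons]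
      unfold pvWsNat pvScan2
      by_cases hc : PySem.Chars.isspace c
      · simp only [pvStep, hc, if_pos]
        obtain ⟨ih1, ih2⟩ := ih (k+1) (sp ++ [k]) (sg ++ [String.ofList buf]) []
        refine ⟨?_, ?_⟩
        · rw [ih1]
          simp only [List.map_cons, Nat.cast_zero, zero_add, List.map_map, List.append_assoc,
            List.cons_append, List.nil_append, List.append_cancel_left_eq, List.cons.injEq, true_and]
          apply List.map_congr_left
          intro i _
          simp only [Function.comp_apply]
          push_cast
          ring
        · rw [ih2]
          cases hs : pvScan2 cs with
          | nil => exact absurd hs (pvScan2_ne_nil cs)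
          | cons s ss => simp [pvPrep]
      · simp only [pvStep, hc, Bool.false_eq_true, if_false]
        obtain ⟨ih1, ih2⟩ := ih (k+1) sp sg (buf ++ [c])
        refine ⟨?_, ?_⟩
        · rw [ih1]
          simp only [List.map_map, List.append_cancel_left_eq]
          apply List.map_congr_left
          intro i _
          simp only [Function.comp_apply]
          push_cast
          ring
        · rw [ih2]
          cases hs : pvScan2 cs with
          | nil => exact absurd hs (pvScan2_ne_nil cs)
          | cons s ss => simp [pvPrep]

theorem pvSpaces_eq (cs : List Char) (k : Int) :
    ((PySem.List.enumerate cs k).filter (fun p => PySem.Chars.isspace p.2)).map (·.1)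
      = (pvWsNat cs).map (fun i : Nat => (i : Int) + k) := by
  induction cs generalizing k with
  | nil => simp [PySem.List.enumerate_nil, pvWsNat]
  | cons c cs ih =>
      rw [PySem.List.enumerate_cons]
      unfold pvWsNat
      by_cases hc : PySem.Chars.isspace c
      · simp only [List.filter_cons, hc, if_pos, List.map_cons]
        rw [ih (k+1)]
        simp only [Nat.cast_zero, zero_add, List.map_map, List.cons.injEq, true_and]
        apply List.map_congr_left
        intro i _
        simp only [Function.comp_apply]
        push_cast
        ring
      · simp only [List.filter_cons, hc, Bool.false_eq_true, if_false]
        rw [ih (k+1)]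
        simp only [List.map_map]
        apply List.map_congr_left
        intro i _
        simp only [Function.comp_apply]
        push_cast
        ring

theorem pvSpaces_wsNat (content : String) :
    pvSpaces content = (pvWsNat content.toList).map (fun i : Nat => (i : Int)) := by
  unfold pvSpaces
  rw [pvSpaces_eq]
  simp

theorem pvGetDSpaces (content : String) (j : Nat) (hj : j < (pvWsNat content.toList).length) :
    PySem.List.pyGetD (pvSpaces content) ((j : Nat) : Int) 0
      = (((pvWsNat content.toList).getD j 0 : Nat) : Int) := by
  rw [pvSpaces_wsNat, PySem.List.pyGetD_natCast]
  rw [List.getD_eq_getElem _ _ (by simpa), List.getD_eq_getElem _ _ hj, List.getElem_map]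

theorem pvSegSlice_mid (content : String) (j : Nat)
    (hj : j + 1 < (pvWsNat content.toList).length) :
    ((pvScan2 content.toList).map String.ofList)[j + 1]? =
      some (PySem.Str.slice content
        (some ((((pvWsNat content.toList).getD j 0 : Nat) : Int) + 1))
        (some (((pvWsNat content.toList).getD (j + 1) 0 : Nat) : Int))) := by
  rw [List.getElem?_map, pvScan2_mid content.toList j hj]
  simp only [Option.map_some, Option.some.injEq]
  conv_rhs => rw [← String.ofList_toList (s := PySem.Str.slice content _ _)]
  rw [PySem.Str.toList_slice]
  rw [PySem.Chars.slice_eq_listSlice]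
  congr 1
  have hcast : ((((pvWsNat content.toList).getD j 0 : Nat) : Int) + 1)
      = (((pvWsNat content.toList).getD j 0 + 1 : Nat) : Int) := by push_cast; ring
  rw [hcast, PySem.List.slice_natCast]
  rw [List.drop_take]

theorem pvSegSlice_last (content : String) (j : Nat)
    (hj : j + 1 = (pvWsNat content.toList).length) :
    ((pvScan2 content.toList).map String.ofList)[j + 1]? =
      some (PySem.Str.slice content
        (some ((((pvWsNat content.toList).getD j 0 : Nat) : Int) + 1)) none) := by
  rw [List.getElem?_map, pvScan2_last content.toList j hj]
  simp only [Option.map_some, Option.some.injEq]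
  conv_rhs => rw [← String.ofList_toList (s := PySem.Str.slice content _ _)]
  rw [PySem.Str.toList_slice]
  rw [PySem.Chars.slice_eq_listSlice]
  congr 1
  have hcast : ((((pvWsNat content.toList).getD j 0 : Nat) : Int) + 1)
      = (((pvWsNat content.toList).getD j 0 + 1 : Nat) : Int) := by push_cast; ring
  rw [hcast, PySem.List.slice_from_natCast]

theorem pvIfPush {β : Type} (c : Int) (f g : Int → β) :
    (fun (acc : List β) sp => if sp = c then acc ++ [f sp] else acc ++ [g sp])
      = fun (acc : List β) sp => acc ++ [if sp = c then f sp else g sp] := by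
  funext acc sp
  split <;> rfl

-- ===== VERDICT (by name: the statement is the Claim_ definition above) =====
theorem extract_operation_numbers_spec : Claim_equal_extract_operation_numbers := by
  intro content _ _
  unfold Spec_extract_operation_numbers extract_operation_numbers extract_operation_numbers_alt
  obtain ⟨hB1, hB2⟩ := pvFoldB content.toList 0 [] [] []
  simp only [add_zero, List.nil_append] at hB1 hB2
  cases hs : pvScan2 content.toList with
  | nil => exact absurd hs (pvScan2_ne_nil content.toList)
  | cons s0 ss =>
  rw [hs] at hB2
  simp only [pvPrep, List.nil_append] at hB2
  rw [← hs] at hB2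
  have hN : (pvSpaces content).length = (pvWsNat content.toList).length := by
    rw [pvSpaces_wsNat, List.length_map]
  have hSlen : (pvScan2 content.toList).length = (pvWsNat content.toList).length + 1 :=
    pvScan2_length content.toList
  rw [Prod.mk.injEq]
  refine ⟨?_, by rw [hB1, pvSpaces_wsNat]⟩
  rw [hB2]
  by_cases hA : PySem.Str.pyGet? content 0 = some 'A'
  · simp only [hA, if_pos]
    rw [pvIfPush, PySem.List.foldl_append_singleton_eq_map, List.nil_append]
    rw [PySem.List.slice_from _ (by norm_num : (0:Int) ≤ 2), show ((2:Int)).toNat = 2 from rfl]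
    apply List.ext_getElem?
    intro i
    rw [List.getElem?_map, PySem.List.getElem?_pyRange_one, List.getElem?_drop]
    by_cases hi : i < ((((pvSpaces content).length : Int) - 1) - 0).toNat
    · rw [if_pos hi]
      rw [hN] at hi
      simp only [Option.map_some]
      rw [show 2 + i = (i + 1) + 1 from by omega]
      by_cases hlast : (i + 1) + 1 = (pvWsNat content.toList).length
      · rw [pvSegSlice_last content (i + 1) hlast]
        rw [if_pos (show (0:Int) + (i:Int) = ((pvSpaces content).length : Int) - 2 from by
          rw [hN]; omega)]
        have hidx : (0 : Int) + (i : Int) + 1 = (((i + 1 : Nat) : Nat) : Int) := by push_cast; ring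
        rw [hidx, pvGetDSpaces content (i + 1) (by omega)]
      · rw [pvSegSlice_mid content (i + 1) (by omega)]
        rw [if_neg (show ¬ (0:Int) + (i:Int) = ((pvSpaces content).length : Int) - 2 from by
          rw [hN]; omega)]
        have hidx : (0 : Int) + (i : Int) + 1 = (((i + 1 : Nat) : Nat) : Int) := by push_cast; ring
        have hidx2 : (0 : Int) + (i : Int) + 2 = (((i + 2 : Nat) : Nat) : Int) := by push_cast; ring
        rw [hidx, hidx2, pvGetDSpaces content (i + 1) (by omega),
          pvGetDSpaces content (i + 2) (by omega)]
    · rw [if_neg hi]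
      rw [hN] at hi
      rw [List.getElem?_eq_none (by simp only [List.length_map, hSlen]; omega)]
      simp
  · simp only [hA, if_false]
    rw [pvIfPush, PySem.List.foldl_append_singleton_eq_map, List.nil_append]
    rw [PySem.List.slice_from _ (by norm_num : (0:Int) ≤ 3), show ((3:Int)).toNat = 3 from rfl]
    apply List.ext_getElem?
    intro i
    rw [List.getElem?_map, PySem.List.getElem?_pyRange_one, List.getElem?_drop]
    by_cases hi : i < ((((pvSpaces content).length : Int) - 2) - 0).toNat
    · rw [if_pos hi]
      rw [hN] at hi
      simp only [Option.map_some]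
      rw [show 3 + i = (i + 2) + 1 from by omega]
      by_cases hlast : (i + 2) + 1 = (pvWsNat content.toList).length
      · rw [pvSegSlice_last content (i + 2) hlast]
        rw [if_pos (show (0:Int) + (i:Int) = ((pvSpaces content).length : Int) - 3 from by
          rw [hN]; omega)]
        have hidx : (0 : Int) + (i : Int) + 2 = (((i + 2 : Nat) : Nat) : Int) := by push_cast; ring
        rw [hidx, pvGetDSpaces content (i + 2) (by omega)]
      · rw [pvSegSlice_mid content (i + 2) (by omega)]
        rw [if_neg (show ¬ (0:Int) + (i:Int) = ((pvSpaces content).length : Int) - 3 from by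
          rw [hN]; omega)]
        have hidx : (0 : Int) + (i : Int) + 2 = (((i + 2 : Nat) : Nat) : Int) := by push_cast; ring
        have hidx2 : (0 : Int) + (i : Int) + 3 = (((i + 3 : Nat) : Nat) : Int) := by push_cast; ring
        rw [hidx, hidx2, pvGetDSpaces content (i + 2) (by omega),
          pvGetDSpaces content (i + 3) (by omega)]
    · rw [if_neg hi]
      rw [hN] at hi
      rw [List.getElem?_eq_none (by simp only [List.length_map, hSlen]; omega)]
      simp
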